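-- pv_equiv track=rewrite | github.com/kurose-rio-lab/ai-automation-series | medical-ai-system/models/vital_monitoring.py | _identify_monitoring_priorities
-- ===== SOURCE A (Python) =====
-- from typing import Dict, List, Tuple, Optional, Any
--
-- def _identify_monitoring_priorities(alerts: List[Dict]) -> List[str]:
--     """監視優先項目を特定"""
--     priorities = []
--
--     # 緊急レベルのアラートを最優先
--     critical_alerts = [alert for alert in alerts if alert['alert_level'] == 'critical']
--     if critical_alerts:
--         priorities.extend([f"緊急監視: {alert['vital_type']}" for alert in critical_alerts])
--
--     # 警告レベルのアラート
--     warning_alerts = [alert for alert in alerts if alert['alert_level'] == 'warning']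
--     if warning_alerts:
--         priorities.extend([f"重点監視: {alert['vital_type']}" for alert in warning_alerts])
--
--     if not priorities:
--         priorities.append("定期的な全般監視")
--
--     return priorities
-- ===== SOURCE B (Python) =====
-- def _identify_monitoring_priorities(alerts):
--     """監視優先項目を特定 — single pass with two buckets."""
--     crit, warn = [], []
--     for alert in alerts:
--         level = alert['alert_level']
--         if level == 'critical':
--             crit.append(f"緊急監視: {alert['vital_type']}")
--         elif level == 'warning':
--             warn.append(f"重点監視: {alert['vital_type']}")
--     priorities = crit + warn
--     if not priorities:
--         priorities.append("定期的な全般監視")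
--     return priorities
-- ===== Notes on version B (the rewrite author's own statement) =====
-- stated objective: simpler
-- what changed: Replaces A's two filter passes plus two map/extend passes with a single loop over alerts that feeds two accumulator buckets (critical, warning) and concatenates them.
import Mathlib
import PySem

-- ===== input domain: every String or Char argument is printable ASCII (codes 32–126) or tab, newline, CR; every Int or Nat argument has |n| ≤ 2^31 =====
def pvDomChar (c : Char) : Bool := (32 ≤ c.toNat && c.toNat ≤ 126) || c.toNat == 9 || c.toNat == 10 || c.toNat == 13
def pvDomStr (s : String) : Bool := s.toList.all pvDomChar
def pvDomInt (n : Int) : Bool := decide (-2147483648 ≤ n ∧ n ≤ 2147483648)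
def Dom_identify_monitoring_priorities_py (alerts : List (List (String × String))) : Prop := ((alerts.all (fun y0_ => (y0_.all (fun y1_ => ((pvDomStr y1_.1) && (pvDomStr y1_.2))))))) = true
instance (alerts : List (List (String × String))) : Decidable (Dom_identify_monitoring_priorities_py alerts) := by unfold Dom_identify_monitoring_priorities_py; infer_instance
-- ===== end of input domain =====

-- B makes ONE pass feeding two accumulator buckets instead of A's two filter passes + two map passes.
-- dict lookup (first match in the association list); Pre_ guarantees the keys A accesses exist
def pvLookup (a : List (String × String)) (k : String) : Option String :=
  (a.find? (fun p => p.1 == k)).map Prod.snd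

-- ===== PORT A =====
def identify_monitoring_priorities_py (alerts : List (List (String × String))) : List String :=
  let priorities : List String := []
  let critical_alerts := alerts.filter (fun a => pvLookup a "alert_level" == some "critical")
  let priorities :=
    if !critical_alerts.isEmpty then
      priorities ++ critical_alerts.map (fun a => "緊急監視: " ++ (pvLookup a "vital_type").getD "")
    else priorities
  let warning_alerts := alerts.filter (fun a => pvLookup a "alert_level" == some "warning")
  let priorities :=
    if !warning_alerts.isEmpty then
      priorities ++ warning_alerts.map (fun a => "重点監視: " ++ (pvLookup a "vital_type").getD "")
    else priorities
  if priorities.isEmpty then priorities ++ ["定期的な全般監視"] else priorities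

-- ===== PORT B =====
-- loop body of B's single pass: route one alert into the right bucket
def pvStep (acc : List String × List String) (a : List (String × String)) : List String × List String :=
  let level := pvLookup a "alert_level"
  if level == some "critical" then
    (acc.1 ++ ["緊急監視: " ++ (pvLookup a "vital_type").getD ""], acc.2)
  else if level == some "warning" then
    (acc.1, acc.2 ++ ["重点監視: " ++ (pvLookup a "vital_type").getD ""])
  else acc

def identify_monitoring_priorities_py_alt (alerts : List (List (String × String))) : List String :=
  let buckets := alerts.foldl pvStep ([], [])
  let priorities := buckets.1 ++ buckets.2
  if priorities.isEmpty then priorities ++ ["定期的な全般監視"] else priorities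

-- ===== PRECONDITION & SPEC =====
-- Pre_ excludes exactly the inputs where Python A raises KeyError: an alert without 'alert_level',
-- or a critical/warning alert without 'vital_type'.
def Pre_identify_monitoring_priorities_py (alerts : List (List (String × String))) : Prop :=
  (alerts.all (fun a =>
    (pvLookup a "alert_level").isSome &&
    (if pvLookup a "alert_level" == some "critical" || pvLookup a "alert_level" == some "warning"
     then (pvLookup a "vital_type").isSome else true))) = true
instance (alerts : List (List (String × String))) : Decidable (Pre_identify_monitoring_priorities_py alerts) := by unfold Pre_identify_monitoring_priorities_py; infer_instance
def pvWitness_identify_monitoring_priorities_py : (List (List (String × String))) :=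
  [[("alert_level", "critical"), ("vital_type", "hr")], [("alert_level", "warning"), ("vital_type", "bp")], [("alert_level", "info")]]

def Spec_identify_monitoring_priorities_py (alerts : List (List (String × String))) (out : List String) : Prop := out = identify_monitoring_priorities_py_alt alerts
instance (alerts : List (List (String × String))) (out : List String) : Decidable (Spec_identify_monitoring_priorities_py alerts out) := by unfold Spec_identify_monitoring_priorities_py; infer_instance

-- ===== CLAIM (what is proved, stated in full; the proofs are below) =====
def Claim_equal_identify_monitoring_priorities_py : Prop := ∀ (alerts : List (List (String × String))), Dom_identify_monitoring_priorities_py alerts → Pre_identify_monitoring_priorities_py alerts → Spec_identify_monitoring_priorities_py alerts (identify_monitoring_priorities_py alerts)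

-- ===== LEMMAS AND PROOFS =====

-- B's fold with buckets appends exactly A's critical list to bucket 1 and A's warning list to bucket 2.
theorem pv_fold_buckets (xs : List (List (String × String))) (acc : List String × List String) :
    xs.foldl pvStep acc
    = (acc.1 ++ (xs.filter (fun a => pvLookup a "alert_level" == some "critical")).map
          (fun a => "緊急監視: " ++ (pvLookup a "vital_type").getD ""),
       acc.2 ++ (xs.filter (fun a => pvLookup a "alert_level" == some "warning")).map
          (fun a => "重点監視: " ++ (pvLookup a "vital_type").getD "")) := by
  induction xs generalizing acc with
  | nil => simp
  | cons a xs ih =>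
    rw [List.foldl_cons, ih]
    by_cases hc : pvLookup a "alert_level" = some "critical"
    · simp [pvStep, hc, List.filter_cons]
    · by_cases hw : pvLookup a "alert_level" = some "warning"
      · simp [pvStep, hc, hw, List.filter_cons]
      · simp [pvStep, hc, hw, List.filter_cons]

-- ===== VERDICT (by name: the statement is the Claim_ definition above) =====
theorem identify_monitoring_priorities_py_spec : Claim_equal_identify_monitoring_priorities_py := by
  intro alerts _ _
  unfold Spec_identify_monitoring_priorities_py identify_monitoring_priorities_py identify_monitoring_priorities_py_alt
  rw [pv_fold_buckets]
  simp only [List.nil_append]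
  cases hcl : alerts.filter (fun a => pvLookup a "alert_level" == some "critical") <;>
    cases hwl : alerts.filter (fun a => pvLookup a "alert_level" == some "warning") <;>
      simp [hcl, hwl]
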